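-- pv_equiv track=rewrite | github.com/satya-666/LeetCode | 3804-number-of-centered-subarrays/3804-number-of-centered-subarrays.py | centeredSubarrays
-- ===== SOURCE A (Python) =====
-- def centeredSubarrays(nums):
--     n = len(nums)
--     res = 0
--     for i in range(n):
--         s = 0
--         freq = {}
--         for j in range(i, n):
--             s += nums[j]
--             if nums[j] in freq:
--                 freq[nums[j]] += 1
--             else:
--                 freq[nums[j]] = 1
--             if s in freq and freq[s] > 0:
--                 res += 1
--     return res
-- ===== SOURCE B (Python) =====
-- def centeredSubarrays(nums):
--     # Counts each qualifying window exactly once at the LEFTMOST element equal to the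
--     # window sum: for each position k, count pairs (i, j) with lo <= i <= k <= j,
--     # prefix[j+1] - prefix[i] == nums[k], where lo excludes any earlier occurrence of
--     # nums[k] from the window's left part.
--     n = len(nums)
--     P = [0]
--     s = 0
--     for x in nums:
--         s += x
--         P.append(s)
--     res = 0
--     for k in range(n):
--         v = nums[k]
--         lo = 0
--         for m in range(k):
--             if nums[m] == v:
--                 lo = m + 1
--         cnt = {}
--         for i in range(lo, k + 1):
--             cnt[P[i]] = cnt.get(P[i], 0) + 1
--         for j in range(k, n):
--             res += cnt.get(P[j + 1] - v, 0)
--     return res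
-- ===== Notes on version B (the rewrite author's own statement) =====
-- stated objective: alternative
-- what changed: B abandons A's per-window membership test entirely: it counts each qualifying window exactly once at the leftmost element equal to the window sum, enumerating (center k, left end i, right end j) triples over a prefix-sum array with a hash count of prefix values, instead of A's scan over windows with an incrementally maintained frequency dict.
import Mathlib
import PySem

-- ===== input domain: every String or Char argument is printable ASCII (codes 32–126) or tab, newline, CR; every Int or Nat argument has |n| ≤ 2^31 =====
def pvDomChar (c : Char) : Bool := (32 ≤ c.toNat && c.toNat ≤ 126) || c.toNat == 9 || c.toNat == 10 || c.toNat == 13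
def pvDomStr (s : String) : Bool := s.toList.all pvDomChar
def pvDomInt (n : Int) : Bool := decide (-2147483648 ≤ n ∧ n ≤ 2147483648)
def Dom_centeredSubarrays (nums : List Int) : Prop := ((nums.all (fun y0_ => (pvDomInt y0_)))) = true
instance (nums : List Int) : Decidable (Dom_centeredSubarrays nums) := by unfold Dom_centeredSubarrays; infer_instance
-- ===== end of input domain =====

-- B replaces A's scan over windows (running sum looked up in an incrementally maintained
-- frequency dict) by a leftmost-witness count over a prefix-sum array: for each position k
-- it counts the pairs (i, j) with i ≤ k ≤ j whose window sum equals nums[k] and whose left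
-- part holds no earlier copy of nums[k]; each qualifying window is counted exactly once.

-- ===== PORT A =====
def centeredSubarrays (nums : List Int) : Int :=
  let n : Int := nums.length
  (PySem.List.pyRange 0 n 1).foldl (fun res i =>
    ((PySem.List.pyRange i n 1).foldl
      (fun (st : Int × PySem.Dict Int Int × Int) j =>
        let x := PySem.List.pyGetD nums j 0
        let s := st.1 + x
        let freq := if st.2.1.contains x
                    then st.2.1.insert x (st.2.1.getD x 0 + 1)
                    else st.2.1.insert x 1
        let res := if freq.contains s && decide (0 < freq.getD s 0) then st.2.2 + 1 else st.2.2
        (s, freq, res))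
      (0, PySem.Dict.empty, res)).2.2) 0

-- ===== PORT B =====
def centeredSubarrays_alt (nums : List Int) : Int :=
  let n : Int := nums.length
  let Ps := nums.foldl (fun (st : List Int × Int) x =>
      let s := st.2 + x
      (st.1 ++ [s], s)) ([0], 0)
  let P := Ps.1
  (PySem.List.pyRange 0 n 1).foldl (fun res k =>
    let v := PySem.List.pyGetD nums k 0
    let lo := (PySem.List.pyRange 0 k 1).foldl (fun lo m =>
        if PySem.List.pyGetD nums m 0 = v then m + 1 else lo) 0
    let cnt := (PySem.List.pyRange lo (k + 1) 1).foldl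
        (fun (d : PySem.Dict Int Int) i =>
          d.insert (PySem.List.pyGetD P i 0) (d.getD (PySem.List.pyGetD P i 0) 0 + 1))
        PySem.Dict.empty
    (PySem.List.pyRange k n 1).foldl (fun res j =>
        res + cnt.getD (PySem.List.pyGetD P (j + 1) 0 - v) 0) res) 0

-- ===== PRECONDITION & SPEC =====
def Spec_centeredSubarrays (nums : List Int) (out : Int) : Prop := out = centeredSubarrays_alt nums
instance (nums : List Int) (out : Int) : Decidable (Spec_centeredSubarrays nums out) := by unfold Spec_centeredSubarrays; infer_instance

-- ===== CLAIM (what is proved, stated in full; the proofs are below) =====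
def Claim_equal_centeredSubarrays : Prop := ∀ (nums : List Int), Dom_centeredSubarrays nums → Spec_centeredSubarrays nums (centeredSubarrays nums)

-- ===== LEMMAS AND PROOFS =====

-- value at a Nat index, prefix sum
def pvG (nums : List Int) (k : Nat) : Int := nums.getD k 0
def pvP (nums : List Int) (t : Nat) : Int := (nums.take t).sum

-- witness predicate: some element of nums[i..j] equals the window sum (Prop and Bool forms)
def pvW (nums : List Int) (i j : Nat) : Prop :=
  ∃ m, i ≤ m ∧ m ≤ j ∧ pvG nums m = pvP nums (j + 1) - pvP nums i

def pvWb (nums : List Int) (i j : Nat) : Bool :=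
  (List.range (j + 1)).any (fun m =>
    decide (i ≤ m) && decide (pvG nums m = pvP nums (j + 1) - pvP nums i))

lemma pvWb_iff (nums : List Int) (i j : Nat) : pvWb nums i j = true ↔ pvW nums i j := by
  unfold pvWb pvW
  simp only [List.any_eq_true, List.mem_range, Bool.and_eq_true, decide_eq_true_eq]
  constructor
  · rintro ⟨m, hm, him, hv⟩
    exact ⟨m, him, by omega, hv⟩
  · rintro ⟨m, him, hmj, hv⟩
    exact ⟨m, by omega, him, hv⟩

-- B's triple condition: k is the leftmost witness of the window (i, j) (Prop and Bool forms)
def pvC (nums : List Int) (k i j : Nat) : Prop :=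
  i ≤ k ∧ k ≤ j ∧ pvP nums i = pvP nums (j + 1) - pvG nums k ∧
    ∀ m, i ≤ m → m < k → pvG nums m ≠ pvG nums k

def pvCb (nums : List Int) (k i j : Nat) : Bool :=
  decide (i ≤ k) && decide (k ≤ j) && decide (pvP nums i = pvP nums (j + 1) - pvG nums k) &&
    (List.range k).all (fun m => decide (m < i) || !decide (pvG nums m = pvG nums k))

lemma pvCb_iff (nums : List Int) (k i j : Nat) : pvCb nums k i j = true ↔ pvC nums k i j := by
  unfold pvCb pvC
  simp only [Bool.and_eq_true, decide_eq_true_eq, List.all_eq_true, List.mem_range,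
    Bool.or_eq_true, Bool.not_eq_eq_eq_not, Bool.not_true, decide_eq_false_iff_not]
  constructor
  · rintro ⟨⟨⟨h1, h2⟩, h3⟩, h4⟩
    refine ⟨h1, h2, h3, fun m him hmk => ?_⟩
    rcases h4 m hmk with h | h
    · omega
    · exact h
  · rintro ⟨h1, h2, h3, h4⟩
    refine ⟨⟨⟨h1, h2⟩, h3⟩, fun m hmk => ?_⟩
    by_cases him : i ≤ m
    · exact Or.inr (h4 m him hmk)
    · exact Or.inl (by omega)

-- mathematical form of B's lo-scan: one past the last m < k with nums[m] = v
def pvLo (nums : List Int) (v : Int) : Nat → Nat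
  | 0 => 0
  | k + 1 => if pvG nums k = v then k + 1 else pvLo nums v k

lemma pvLo_zero (nums : List Int) (v : Int) : pvLo nums v 0 = 0 := rfl
lemma pvLo_succ (nums : List Int) (v : Int) (k : Nat) :
    pvLo nums v (k + 1) = if pvG nums k = v then k + 1 else pvLo nums v k := rfl

lemma pvP_succ (nums : List Int) (t : Nat) (ht : t < nums.length) :
    pvP nums (t + 1) = pvP nums t + pvG nums t := by
  unfold pvP pvG
  rw [List.take_add_one, List.sum_append, List.getD, List.getElem?_eq_getElem ht]
  simp

lemma sum_map_range_int (f : Nat → Int) (c : Nat) :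
    ((List.range c).map f).sum = ∑ u ∈ Finset.range c, f u := rfl

lemma count_map_range (f : Nat → Int) (x : Int) (c : Nat) :
    ((((List.range c).map f).count x : Nat) : Int)
      = ∑ u ∈ Finset.range c, (if f u = x then (1 : Int) else 0) := by
  induction c with
  | zero => simp
  | succ c ih =>
    rw [List.range_succ, List.map_append, List.count_append, Finset.sum_range_succ, ← ih]
    by_cases h : f c = x <;> simp [h]

-- ---- A-side characterisation ----

def pvIndA (nums : List Int) (a j : Nat) : Int :=
  if pvWb nums a j = true then 1 else 0

-- A's branch on `contains` is exactly the counter-building step.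
lemma freq_step (d : PySem.Dict Int Int) (x : Int) :
    (if d.contains x then d.insert x (d.getD x 0 + 1) else d.insert x 1)
      = d.insert x (d.getD x 0 + 1) := by
  by_cases h : d.contains x = true
  · simp [h]
  · simp only [Bool.not_eq_true] at h
    rw [PySem.Dict.getD_of_not_contains (h := h)]
    simp [h]

-- A's check against the counter of w is membership in w
lemma cond_iff (w : List Int) (s : Int) :
    (((PySem.Dict.counter w).contains s && decide (0 < (PySem.Dict.counter w).getD s 0)) = true)
      ↔ s ∈ w := by
  constructor
  · intro h
    rw [Bool.and_eq_true] at h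
    have := h.1
    rwa [PySem.Dict.contains_counter, List.contains_iff_mem] at this
  · intro hm
    rw [Bool.and_eq_true]
    refine ⟨?_, ?_⟩
    · rw [PySem.Dict.contains_counter, List.contains_iff_mem]; exact hm
    · rw [PySem.Dict.getD_counter]
      have : 0 < w.count s := List.count_pos_iff.2 hm
      simp; omega

lemma mem_window (nums : List Int) (a t : Nat) (x : Int) (h : a + t ≤ nums.length) :
    x ∈ (nums.drop a).take t ↔ ∃ m, a ≤ m ∧ m < a + t ∧ pvG nums m = x := by
  rw [List.mem_iff_getElem]
  have hlen : ((nums.drop a).take t).length = t := by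
    simp [List.length_take, List.length_drop]; omega
  constructor
  · rintro ⟨u, hu, hx⟩
    rw [hlen] at hu
    refine ⟨a + u, by omega, by omega, ?_⟩
    rw [List.getElem_take, List.getElem_drop] at hx
    unfold pvG
    rw [List.getD_eq_getElem nums 0 (by omega)]
    exact hx
  · rintro ⟨m, ham, hmt, hx⟩
    refine ⟨m - a, by omega, ?_⟩
    rw [List.getElem_take, List.getElem_drop]
    simp only [show a + (m - a) = m from by omega]
    unfold pvG at hx
    rw [List.getD_eq_getElem nums 0 (by omega)] at hx
    exact hx

lemma a_inner (nums : List Int) (a : Nat) : ∀ (c t : Nat), a + t + c = nums.length →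
    ∀ res : Int,
    ((PySem.List.pyRange ((a + t : Nat) : Int) ((nums.length : Nat) : Int) 1).foldl
      (fun (st : Int × PySem.Dict Int Int × Int) j =>
        let x := PySem.List.pyGetD nums j 0
        let s := st.1 + x
        let freq := if st.2.1.contains x
                    then st.2.1.insert x (st.2.1.getD x 0 + 1)
                    else st.2.1.insert x 1
        let res := if freq.contains s && decide (0 < freq.getD s 0) then st.2.2 + 1 else st.2.2
        (s, freq, res))
      (pvP nums (a + t) - pvP nums a, PySem.Dict.counter ((nums.drop a).take t), res)).2.2
    = res + ((List.range c).map (fun u => pvIndA nums a (a + t + u))).sum := by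
  intro c
  induction c with
  | zero =>
    intro t ht res
    have hle : ((nums.length : Nat) : Int) ≤ ((a + t : Nat) : Int) := by
      push_cast; omega
    rw [PySem.List.pyRange_one_eq_nil hle]
    simp
  | succ c ih =>
    intro t ht res
    have hlen : a + t < nums.length := by omega
    have hlt : ((a + t : Nat) : Int) < ((nums.length : Nat) : Int) := by push_cast; omega
    rw [PySem.List.pyRange_one_cons hlt]
    simp only [List.foldl_cons]
    have hx : PySem.List.pyGetD nums ((a + t : Nat) : Int) 0 = pvG nums (a + t) := by
      rw [PySem.List.pyGetD_natCast]; rfl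
    have hw : (nums.drop a).take t ++ [pvG nums (a + t)] = (nums.drop a).take (t + 1) := by
      rw [List.take_add_one]
      congr 1
      rw [List.getElem?_drop]
      unfold pvG
      rw [List.getElem?_eq_getElem hlen, List.getD_eq_getElem nums 0 hlen]
      rfl
    have hs : pvP nums (a + t) - pvP nums a + pvG nums (a + t)
        = pvP nums (a + t + 1) - pvP nums a := by
      rw [pvP_succ nums (a + t) hlen]; ring
    have hfreq : (if (PySem.Dict.counter ((nums.drop a).take t)).contains (pvG nums (a + t))
          then (PySem.Dict.counter ((nums.drop a).take t)).insert (pvG nums (a + t))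
                 ((PySem.Dict.counter ((nums.drop a).take t)).getD (pvG nums (a + t)) 0 + 1)
          else (PySem.Dict.counter ((nums.drop a).take t)).insert (pvG nums (a + t)) 1)
        = PySem.Dict.counter ((nums.drop a).take (t + 1)) := by
      rw [freq_step, ← hw,
        ← PySem.Dict.foldl_insert_getD_add_one_eq_counter ((nums.drop a).take t),
        ← PySem.Dict.foldl_insert_getD_add_one_eq_counter
            ((nums.drop a).take t ++ [pvG nums (a + t)]),
        List.foldl_append]
      simp
    simp only [hx]
    rw [hfreq, hs]
    have hcond : (((PySem.Dict.counter ((nums.drop a).take (t + 1))).contains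
            (pvP nums (a + t + 1) - pvP nums a)
          && decide (0 < (PySem.Dict.counter ((nums.drop a).take (t + 1))).getD
            (pvP nums (a + t + 1) - pvP nums a) 0)) = true)
        ↔ pvWb nums a (a + t) = true := by
      rw [cond_iff, mem_window nums a (t + 1) _ (by omega), pvWb_iff]
      unfold pvW
      constructor
      · rintro ⟨m, h1, h2, h3⟩
        exact ⟨m, h1, by omega, h3⟩
      · rintro ⟨m, h1, h2, h3⟩
        exact ⟨m, h1, by omega, h3⟩
    rw [if_congr hcond rfl rfl]
    have hcast : ((a + t : Nat) : Int) + 1 = ((a + (t + 1) : Nat) : Int) := by push_cast; ring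
    rw [hcast, show a + t + 1 = a + (t + 1) from by omega]
    rw [ih (t + 1) (by omega)]
    rw [List.range_succ_eq_map, List.map_cons, List.map_map, List.sum_cons]
    have hsh : ((List.range c).map ((fun u => pvIndA nums a (a + t + u)) ∘ Nat.succ))
        = (List.range c).map (fun u => pvIndA nums a (a + (t + 1) + u)) := by
      refine List.map_congr_left (fun u _ => ?_)
      simp only [Function.comp_apply]
      rw [show a + t + Nat.succ u = a + (t + 1) + u from by omega]
    rw [hsh]
    unfold pvIndA
    rw [show a + t + 0 = a + t from by omega]
    by_cases hwp : pvWb nums a (a + t) = true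
    · rw [if_pos hwp, if_pos hwp]; ring
    · rw [if_neg hwp, if_neg hwp]; ring

lemma a_total (nums : List Int) :
    centeredSubarrays nums
      = ∑ a ∈ Finset.range nums.length, ∑ j ∈ Finset.range nums.length,
          (if (decide (a ≤ j) && pvWb nums a j) = true then (1 : Int) else 0) := by
  simp only [centeredSubarrays]
  rw [PySem.List.foldl_congr_mem
    (g := fun (res : Int) (aI : Int) =>
      res + ((List.range (nums.length - aI.toNat)).map
        (fun u => pvIndA nums aI.toNat (aI.toNat + 0 + u))).sum)
    (h := ?_)]
  · rw [PySem.List.foldl_add, zero_add, PySem.List.pyRange_one, List.map_map]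
    have hlen : (((nums.length : Nat) : Int) - 0).toNat = nums.length := by omega
    rw [hlen]
    have step : ((List.range nums.length).map
          ((fun aI : Int => ((List.range (nums.length - aI.toNat)).map
              (fun u => pvIndA nums aI.toNat (aI.toNat + 0 + u))).sum)
            ∘ (fun u : Nat => (0 : Int) + u)))
        = (List.range nums.length).map (fun a =>
            ∑ j ∈ Finset.range nums.length,
              (if (decide (a ≤ j) && pvWb nums a j) = true then (1 : Int) else 0)) := by
      refine List.map_congr_left (fun a ha => ?_)
      rw [List.mem_range] at ha
      simp only [Function.comp_apply, zero_add, Int.toNat_natCast]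
      rw [sum_map_range_int]
      rw [show (∑ u ∈ Finset.range (nums.length - a), pvIndA nums a (a + 0 + u))
          = ∑ j ∈ Finset.Ico a nums.length, pvIndA nums a j from by
        rw [Finset.sum_Ico_eq_sum_range]
        refine Finset.sum_congr rfl (fun u _ => ?_)
        rw [show a + 0 + u = a + u from by omega]]
      have hsub : Finset.Ico a nums.length ⊆ Finset.range nums.length := by
        intro j hj
        rw [Finset.mem_Ico] at hj
        exact Finset.mem_range.2 hj.2
      refine (Finset.sum_congr rfl (fun j hj => ?_)).trans
        (Finset.sum_subset hsub (fun j hjr hnj => ?_))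
      · rw [Finset.mem_Ico] at hj
        unfold pvIndA
        refine if_congr ?_ rfl rfl
        rw [Bool.and_eq_true, decide_eq_true_eq]
        constructor
        · exact fun hwp => ⟨hj.1, hwp⟩
        · exact fun hwp => hwp.2
      · rw [Finset.mem_Ico] at hnj
        rw [Finset.mem_range] at hjr
        rw [if_neg]
        rw [Bool.and_eq_true, decide_eq_true_eq]
        rintro ⟨haj, -⟩
        omega
    rw [step, sum_map_range_int]
  · intro res aI haI
    rw [PySem.List.mem_pyRange_one] at haI
    obtain ⟨a, rfl⟩ : ∃ a : Nat, aI = (a : Int) :=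
      ⟨aI.toNat, (Int.toNat_of_nonneg haI.1).symm⟩
    have h := a_inner nums a (nums.length - a) 0 (by omega) res
    rw [show ((a + 0 : Nat) : Int) = ((a : Nat) : Int) from by push_cast; ring] at h
    rw [show pvP nums (a + 0) - pvP nums a = 0 from by rw [Nat.add_zero]; ring] at h
    rw [show (nums.drop a).take 0 = ([] : List Int) from List.take_zero] at h
    rw [show PySem.Dict.counter ([] : List Int) = PySem.Dict.empty from rfl] at h
    rw [h]
    simp only [Int.toNat_natCast]

-- ---- B-side characterisation ----

lemma ps_fold (nums : List Int) : ∀ t, t ≤ nums.length →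
    ((nums.take t).foldl (fun (st : List Int × Int) x =>
        (st.1 ++ [st.2 + x], st.2 + x)) ([0], 0))
      = ((List.range (t + 1)).map (pvP nums), pvP nums t) := by
  intro t
  induction t with
  | zero => simp [pvP]
  | succ t ih =>
    intro ht
    have ht' : t < nums.length := by omega
    rw [List.take_add_one, List.getElem?_eq_getElem ht']
    simp only [Option.toList_some, List.foldl_append, ih (by omega), List.foldl_cons,
      List.foldl_nil]
    have hg : pvP nums t + nums[t] = pvP nums (t + 1) := by
      rw [pvP_succ nums t ht']; unfold pvG; rw [List.getD_eq_getElem nums 0 ht']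
    rw [hg, List.range_succ (n := t + 1), List.map_append]
    simp

lemma ps_all (nums : List Int) :
    (nums.foldl (fun (st : List Int × Int) x => (st.1 ++ [st.2 + x], st.2 + x)) ([0], 0))
      = ((List.range (nums.length + 1)).map (pvP nums), pvP nums nums.length) := by
  have h := ps_fold nums nums.length le_rfl
  rwa [List.take_length] at h

lemma pget (nums : List Int) (u : Nat) (hu : u ≤ nums.length) :
    PySem.List.pyGetD ((List.range (nums.length + 1)).map (pvP nums)) (u : Int) 0
      = pvP nums u := by
  rw [PySem.List.pyGetD_natCast, PySem.List.getD_map_range]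
  omega

lemma lo_fold (nums : List Int) (v : Int) : ∀ k : Nat,
    (PySem.List.pyRange 0 (k : Int) 1).foldl (fun lo m =>
        if PySem.List.pyGetD nums m 0 = v then m + 1 else lo) 0
      = (pvLo nums v k : Int) := by
  intro k
  induction k with
  | zero => simp [pvLo_zero]
  | succ k ih =>
    have hc : ((k + 1 : Nat) : Int) = (k : Int) + 1 := by push_cast; ring
    rw [hc, PySem.List.pyRange_one_succ_right (by positivity), List.foldl_append]
    simp only [List.foldl_cons, List.foldl_nil, ih]
    rw [PySem.List.pyGetD_natCast]
    show (if nums.getD k 0 = v then (k : Int) + 1 else (pvLo nums v k : Int)) = _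
    rw [pvLo_succ]
    by_cases h : pvG nums k = v
    · rw [if_pos (by simpa [pvG] using h), if_pos h]; push_cast; ring
    · rw [if_neg (by simpa [pvG] using h), if_neg h]

lemma pvLo_le (nums : List Int) (v : Int) : ∀ k, pvLo nums v k ≤ k := by
  intro k
  induction k with
  | zero => simp [pvLo_zero]
  | succ k ih => rw [pvLo_succ]; split <;> omega

lemma pvLo_le_iff (nums : List Int) (v : Int) : ∀ k i : Nat,
    pvLo nums v k ≤ i ↔ ∀ m, i ≤ m → m < k → pvG nums m ≠ v := by
  intro k
  induction k with
  | zero => intro i; simp [pvLo_zero]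
  | succ k ih =>
    intro i
    rw [pvLo_succ]
    by_cases h : pvG nums k = v
    · rw [if_pos h]
      constructor
      · intro hle m him hmk
        omega
      · intro hall
        by_contra hlt
        exact hall k (by omega) (by omega) h
    · rw [if_neg h, ih]
      constructor
      · intro hall m him hmk
        rcases Nat.lt_or_ge m k with h1 | h1
        · exact hall m him h1
        · have : m = k := by omega
          subst this; exact h
      · intro hall m him hmk
        exact hall m him (by omega)

-- B's cnt lookup counts matching left endpoints
lemma cnt_getD (nums : List Int) (k : Nat) (hk : k < nums.length) (x : Int) :
    ((PySem.List.pyRange ((pvLo nums (pvG nums k) k : Nat) : Int) ((k : Int) + 1) 1).foldl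
        (fun (d : PySem.Dict Int Int) i =>
          d.insert (PySem.List.pyGetD ((List.range (nums.length + 1)).map (pvP nums)) i 0)
            (d.getD (PySem.List.pyGetD ((List.range (nums.length + 1)).map (pvP nums)) i 0) 0 + 1))
        PySem.Dict.empty).getD x 0
      = ∑ i ∈ Finset.range nums.length,
          (if pvLo nums (pvG nums k) k ≤ i ∧ i ≤ k ∧ pvP nums i = x then (1 : Int) else 0) := by
  set lo := pvLo nums (pvG nums k) k with hlo
  have hlok : lo ≤ k := pvLo_le nums _ k
  -- turn the fold over indices into a fold over the mapped list
  rw [show ((PySem.List.pyRange ((lo : Nat) : Int) ((k : Int) + 1) 1).foldl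
        (fun (d : PySem.Dict Int Int) i =>
          d.insert (PySem.List.pyGetD ((List.range (nums.length + 1)).map (pvP nums)) i 0)
            (d.getD (PySem.List.pyGetD ((List.range (nums.length + 1)).map (pvP nums)) i 0) 0 + 1))
        PySem.Dict.empty)
      = (((PySem.List.pyRange ((lo : Nat) : Int) ((k : Int) + 1) 1).map
          (fun i => PySem.List.pyGetD ((List.range (nums.length + 1)).map (pvP nums)) i 0)).foldl
          (fun (d : PySem.Dict Int Int) y => d.insert y (d.getD y 0 + 1)) PySem.Dict.empty) from
      (List.foldl_map
        (f := fun i => PySem.List.pyGetD ((List.range (nums.length + 1)).map (pvP nums)) i 0)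
        (g := fun (d : PySem.Dict Int Int) y => d.insert y (d.getD y 0 + 1))).symm]
  rw [PySem.Dict.getD_foldl_insert_add_one, PySem.Dict.getD_empty, zero_add]
  -- identify the mapped list
  have hmap : ((PySem.List.pyRange ((lo : Nat) : Int) ((k : Int) + 1) 1).map
        (fun i => PySem.List.pyGetD ((List.range (nums.length + 1)).map (pvP nums)) i 0))
      = (List.range (k + 1 - lo)).map (fun u => pvP nums (lo + u)) := by
    rw [PySem.List.pyRange_one, List.map_map]
    have hlen : (((k : Int) + 1) - (lo : Nat)).toNat = k + 1 - lo := by omega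
    rw [hlen]
    refine List.map_congr_left (fun u hu => ?_)
    rw [List.mem_range] at hu
    have : ((lo : Nat) : Int) + (u : Nat) = ((lo + u : Nat) : Int) := by push_cast; ring
    simp only [Function.comp_apply, this]
    exact pget nums (lo + u) (by omega)
  rw [hmap, count_map_range]
  -- reindex from offsets u to absolute left endpoints i
  rw [show (∑ u ∈ Finset.range (k + 1 - lo), (if pvP nums (lo + u) = x then (1 : Int) else 0))
      = ∑ i ∈ Finset.Ico lo (k + 1), (if pvP nums i = x then (1 : Int) else 0) from
    (Finset.sum_Ico_eq_sum_range (f := fun i => if pvP nums i = x then (1 : Int) else 0)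
      (m := lo) (n := k + 1)).symm]
  have hsub : Finset.Ico lo (k + 1) ⊆ Finset.range nums.length := by
    intro i hi
    rw [Finset.mem_Ico] at hi
    exact Finset.mem_range.2 (by omega)
  refine (Finset.sum_congr rfl (fun i hi => ?_)).trans
    (Finset.sum_subset hsub (fun i _ hni => ?_))
  · rw [Finset.mem_Ico] at hi
    refine if_congr ?_ rfl rfl
    constructor
    · exact fun hx => ⟨hi.1, by omega, hx⟩
    · exact fun hx => hx.2.2
  · rw [Finset.mem_Ico] at hni
    rw [if_neg (by omega)]

lemma b_inner (nums : List Int) (k : Nat) (hk : k < nums.length) (res : Int) :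
    ((PySem.List.pyRange ((k : Nat) : Int) ((nums.length : Nat) : Int) 1).foldl
      (fun res j =>
        res + ((PySem.List.pyRange ((pvLo nums (pvG nums k) k : Nat) : Int) (((k : Nat) : Int) + 1) 1).foldl
          (fun (d : PySem.Dict Int Int) i =>
            d.insert (PySem.List.pyGetD ((List.range (nums.length + 1)).map (pvP nums)) i 0)
              (d.getD (PySem.List.pyGetD ((List.range (nums.length + 1)).map (pvP nums)) i 0) 0 + 1))
          PySem.Dict.empty).getD
            (PySem.List.pyGetD ((List.range (nums.length + 1)).map (pvP nums)) (j + 1) 0 - pvG nums k) 0)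
      res)
    = res + ∑ j ∈ Finset.range nums.length, ∑ i ∈ Finset.range nums.length,
        (if pvCb nums k i j = true then (1 : Int) else 0) := by
  rw [PySem.List.foldl_add]
  congr 1
  set F : Nat → Int := fun j =>
    ∑ i ∈ Finset.range nums.length,
      (if pvLo nums (pvG nums k) k ≤ i ∧ i ≤ k ∧
          pvP nums i = pvP nums (j + 1) - pvG nums k then (1 : Int) else 0) with hF
  have step1 : ((PySem.List.pyRange ((k : Nat) : Int) ((nums.length : Nat) : Int) 1).map
      (fun j => ((PySem.List.pyRange ((pvLo nums (pvG nums k) k : Nat) : Int) (((k : Nat) : Int) + 1) 1).foldl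
          (fun (d : PySem.Dict Int Int) i =>
            d.insert (PySem.List.pyGetD ((List.range (nums.length + 1)).map (pvP nums)) i 0)
              (d.getD (PySem.List.pyGetD ((List.range (nums.length + 1)).map (pvP nums)) i 0) 0 + 1))
          PySem.Dict.empty).getD
            (PySem.List.pyGetD ((List.range (nums.length + 1)).map (pvP nums)) (j + 1) 0 - pvG nums k) 0))
      = (PySem.List.pyRange ((k : Nat) : Int) ((nums.length : Nat) : Int) 1).map
          (fun j => F j.toNat) := by
    refine List.map_congr_left (fun j hj => ?_)
    rw [PySem.List.mem_pyRange_one] at hj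
    obtain ⟨jN, rfl⟩ : ∃ jN : Nat, j = (jN : Int) :=
      ⟨j.toNat, (Int.toNat_of_nonneg (by omega)).symm⟩
    have hjn : jN < nums.length := by omega
    have hc : ((jN : Nat) : Int) + 1 = ((jN + 1 : Nat) : Int) := by push_cast; ring
    rw [hc, pget nums (jN + 1) (by omega), cnt_getD nums k hk]
    simp only [Int.toNat_natCast, hF]
  rw [step1, PySem.List.pyRange_one, List.map_map]
  have hlen : (((nums.length : Nat) : Int) - ((k : Nat) : Int)).toNat = nums.length - k := by
    omega
  rw [hlen]
  have step2 : ((List.range (nums.length - k)).map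
        ((fun j : Int => F j.toNat) ∘ (fun u : Nat => ((k : Nat) : Int) + u)))
      = (List.range (nums.length - k)).map (fun u => F (k + u)) := by
    refine List.map_congr_left (fun u hu => ?_)
    simp only [Function.comp_apply]
    have hcu : ((k : Nat) : Int) + (u : Nat) = ((k + u : Nat) : Int) := by push_cast; ring
    rw [hcu, Int.toNat_natCast]
  rw [step2, sum_map_range_int]
  rw [show (∑ u ∈ Finset.range (nums.length - k), F (k + u))
      = ∑ j ∈ Finset.Ico k nums.length, F j from
    (Finset.sum_Ico_eq_sum_range (f := F) (m := k) (n := nums.length)).symm]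
  have hsub : Finset.Ico k nums.length ⊆ Finset.range nums.length := by
    intro j hj
    rw [Finset.mem_Ico] at hj
    exact Finset.mem_range.2 hj.2
  refine (Finset.sum_congr rfl (fun j hj => ?_)).trans
    (Finset.sum_subset hsub (fun j hjr hnj => ?_))
  · rw [Finset.mem_Ico] at hj
    refine Finset.sum_congr rfl (fun i _ => ?_)
    refine if_congr ?_ rfl rfl
    rw [pvCb_iff]
    unfold pvC
    constructor
    · rintro ⟨hlo, hik, hpi⟩
      exact ⟨hik, hj.1, by omega,
        fun m him hmk => ((pvLo_le_iff nums (pvG nums k) k i).mp hlo) m him hmk⟩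
    · rintro ⟨hik, hkj, hpi, hmin⟩
      exact ⟨(pvLo_le_iff nums (pvG nums k) k i).mpr hmin, hik, by omega⟩
  · rw [Finset.mem_Ico] at hnj
    rw [Finset.mem_range] at hjr
    refine Finset.sum_eq_zero (fun i _ => ?_)
    rw [if_neg]
    rw [pvCb_iff]
    rintro ⟨-, hkj, -⟩
    omega

lemma b_total (nums : List Int) :
    centeredSubarrays_alt nums
      = ∑ k ∈ Finset.range nums.length, ∑ j ∈ Finset.range nums.length,
          ∑ i ∈ Finset.range nums.length,
            (if pvCb nums k i j = true then (1 : Int) else 0) := by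
  simp only [centeredSubarrays_alt, ps_all]
  rw [PySem.List.foldl_congr_mem
    (g := fun (res : Int) (kI : Int) =>
      res + ∑ j ∈ Finset.range nums.length, ∑ i ∈ Finset.range nums.length,
        (if pvCb nums kI.toNat i j = true then (1 : Int) else 0))
    (h := ?_)]
  · rw [PySem.List.foldl_add, zero_add, PySem.List.pyRange_one, List.map_map]
    have hlen : (((nums.length : Nat) : Int) - 0).toNat = nums.length := by omega
    rw [hlen]
    have step : ((List.range nums.length).map
          ((fun kI : Int =>
            ∑ j ∈ Finset.range nums.length, ∑ i ∈ Finset.range nums.length,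
              (if pvCb nums kI.toNat i j = true then (1 : Int) else 0)) ∘ (fun u : Nat => (0 : Int) + u)))
        = (List.range nums.length).map (fun k =>
            ∑ j ∈ Finset.range nums.length, ∑ i ∈ Finset.range nums.length,
              (if pvCb nums k i j = true then (1 : Int) else 0)) := by
      refine List.map_congr_left (fun u _ => ?_)
      simp only [Function.comp_apply, zero_add, Int.toNat_natCast]
      rfl
    rw [step, sum_map_range_int]
  · intro res kI hkI
    rw [PySem.List.mem_pyRange_one] at hkI
    obtain ⟨kN, rfl⟩ : ∃ kN : Nat, kI = (kN : Int) :=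
      ⟨kI.toNat, (Int.toNat_of_nonneg hkI.1).symm⟩
    have hkn : kN < nums.length := by omega
    have hv : PySem.List.pyGetD nums ((kN : Nat) : Int) 0 = pvG nums kN := by
      rw [PySem.List.pyGetD_natCast]; rfl
    rw [hv, lo_fold nums (pvG nums kN) kN, b_inner nums kN hkn res]
    simp only [Int.toNat_natCast]
    rfl

-- ---- the combinatorial identity: each window with a witness has exactly one leftmost witness ----

lemma key (nums : List Int) (i j : Nat) (hj : j < nums.length) :
    (∑ k ∈ Finset.range nums.length, (if pvCb nums k i j = true then (1 : Int) else 0))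
      = (if (decide (i ≤ j) && pvWb nums i j) = true then (1 : Int) else 0) := by
  have hWb : ((decide (i ≤ j) && pvWb nums i j) = true) ↔ (i ≤ j ∧ pvW nums i j) := by
    rw [Bool.and_eq_true, decide_eq_true_eq, pvWb_iff]
  by_cases h : i ≤ j ∧ pvW nums i j
  · rw [if_pos (hWb.mpr h)]
    have h2 : ∃ m, i ≤ m ∧ m ≤ j ∧ pvG nums m = pvP nums (j + 1) - pvP nums i := h.2
    set k0 := Nat.find h2 with hk0
    have hq : i ≤ k0 ∧ k0 ≤ j ∧ pvG nums k0 = pvP nums (j + 1) - pvP nums i :=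
      Nat.find_spec h2
    have hiff : ∀ k, (pvCb nums k i j = true) ↔ k = k0 := by
      intro k
      rw [pvCb_iff]
      constructor
      · rintro ⟨hik, hkj, hpre, hmin⟩
        have hqk : i ≤ k ∧ k ≤ j ∧ pvG nums k = pvP nums (j + 1) - pvP nums i :=
          ⟨hik, hkj, by omega⟩
        have hle : k0 ≤ k := Nat.find_min' h2 hqk
        rcases Nat.lt_or_ge k0 k with hlt | hge
        · exact absurd (by omega : pvG nums k0 = pvG nums k) (hmin k0 hq.1 hlt)
        · omega
      · rintro rfl
        refine ⟨hq.1, hq.2.1, by omega, ?_⟩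
        intro m him hmk heq
        exact Nat.find_min h2 hmk ⟨him, by omega, by omega⟩
    calc (∑ k ∈ Finset.range nums.length, (if pvCb nums k i j = true then (1 : Int) else 0))
        = ∑ k ∈ Finset.range nums.length, (if k = k0 then (1 : Int) else 0) :=
          Finset.sum_congr rfl (fun k _ => by rw [if_congr (hiff k) rfl rfl])
      _ = 1 := by
          rw [Finset.sum_ite_eq' (Finset.range nums.length) k0 (fun _ => (1 : Int))]
          rw [if_pos (Finset.mem_range.2 (by omega))]
  · rw [if_neg (fun hc => h (hWb.mp hc))]
    refine Finset.sum_eq_zero (fun k _ => ?_)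
    rw [if_neg]
    rw [pvCb_iff]
    rintro ⟨hik, hkj, hpre, -⟩
    exact h ⟨by omega, k, hik, hkj, by omega⟩

-- ===== VERDICT (by name: the statement is the Claim_ definition above) =====
theorem centeredSubarrays_spec : Claim_equal_centeredSubarrays := by
  intro nums _
  unfold Spec_centeredSubarrays
  rw [a_total, b_total]
  calc (∑ a ∈ Finset.range nums.length, ∑ j ∈ Finset.range nums.length,
          (if (decide (a ≤ j) && pvWb nums a j) = true then (1 : Int) else 0))
      = ∑ i ∈ Finset.range nums.length, ∑ j ∈ Finset.range nums.length,
          ∑ k ∈ Finset.range nums.length, (if pvCb nums k i j = true then (1 : Int) else 0) := by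
        refine Finset.sum_congr rfl (fun i _ => Finset.sum_congr rfl (fun j hj => ?_))
        rw [Finset.mem_range] at hj
        exact (key nums i j hj).symm
    _ = ∑ j ∈ Finset.range nums.length, ∑ i ∈ Finset.range nums.length,
          ∑ k ∈ Finset.range nums.length, (if pvCb nums k i j = true then (1 : Int) else 0) :=
        Finset.sum_comm
    _ = ∑ j ∈ Finset.range nums.length, ∑ k ∈ Finset.range nums.length,
          ∑ i ∈ Finset.range nums.length, (if pvCb nums k i j = true then (1 : Int) else 0) :=
        Finset.sum_congr rfl (fun j _ => Finset.sum_comm)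
    _ = ∑ k ∈ Finset.range nums.length, ∑ j ∈ Finset.range nums.length,
          ∑ i ∈ Finset.range nums.length, (if pvCb nums k i j = true then (1 : Int) else 0) :=
        Finset.sum_comm
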